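-- pv_equiv track=rewrite | github.com/DanMish123/PythonProjects | DN02.py | najdaljsaPot
-- ===== SOURCE A (Python) =====
-- def najdaljsaPot(ovire):
--     vrsticaStolpec = []
--     for x in range(1, 11):
--         seznamY = []
--         for x1, x2, y in ovire:
--             if x1 <= x <= x2:
--                 seznamY.append(y)
--         if not seznamY:
--             return False
--         else:
--             vrsticaStolpec.append((x,min(seznamY)))
--     return vrsticaStolpec
-- ===== SOURCE B (Python) =====
-- def najdaljsaPot(ovire):
--     # One pass over the obstacles builds a 10-column minimum table,
--     # then a separate pass validates and assembles the result.
--     mins = [None] * 10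
--     for x1, x2, y in ovire:
--         mins = [y if (x1 <= i + 1 <= x2 and (m is None or y < m)) else m
--                 for i, m in enumerate(mins)]
--     out = []
--     for i, m in enumerate(mins):
--         if m is None:
--             return False
--         out.append((i + 1, m))
--     return out
-- ===== Notes on version B (the rewrite author's own statement) =====
-- stated objective: alternative
-- what changed: B makes a single table-building pass over the obstacles, maintaining a 10-entry column-minimum table updated functionally per obstacle, then validates and assembles the result in a separate pass, instead of A's ten scans over all obstacles each followed by a min().
-- outside the precondition, e.g. on najdaljsaPot([]): A returns False, B returns False
import Mathlib
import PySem

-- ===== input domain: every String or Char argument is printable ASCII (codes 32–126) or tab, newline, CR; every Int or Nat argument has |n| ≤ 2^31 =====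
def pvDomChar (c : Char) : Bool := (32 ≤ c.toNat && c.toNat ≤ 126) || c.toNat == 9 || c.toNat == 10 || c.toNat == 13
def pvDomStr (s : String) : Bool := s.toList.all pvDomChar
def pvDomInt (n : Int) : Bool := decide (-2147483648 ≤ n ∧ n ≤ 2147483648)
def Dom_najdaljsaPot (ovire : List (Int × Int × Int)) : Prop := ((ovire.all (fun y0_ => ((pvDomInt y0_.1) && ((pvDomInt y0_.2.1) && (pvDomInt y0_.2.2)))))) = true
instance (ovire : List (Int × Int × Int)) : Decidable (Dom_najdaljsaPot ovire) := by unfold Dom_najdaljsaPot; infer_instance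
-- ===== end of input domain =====

-- B replaces A's ten obstacle scans by one table-building pass over the obstacles plus a
-- separate validation/assembly pass over the 10-column minimum table (alternative decomposition,
-- same asymptotic cost).


-- ===== PORT A =====
-- seznamY for column x: 'for x1, x2, y in ovire: if x1 <= x <= x2: seznamY.append(y)'
def pvSeznamY (ovire : List (Int × Int × Int)) (x : Int) : List Int :=
  ovire.foldl (fun s p => if p.1 ≤ x ∧ x ≤ p.2.1 then s ++ [p.2.2] else s) []

-- the 'for x in range(1, 11)' loop with accumulator vrsticaStolpec; the empty-seznamY branch is
-- Python's 'return False' (not a List (Int × Int)) and is excluded by Pre_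
def pvALoop (ovire : List (Int × Int × Int)) : List Int → List (Int × Int) → List (Int × Int)
  | [], acc => acc
  | x :: xs, acc =>
    match PySem.List.min? (pvSeznamY ovire x) (fun y => y) with
    | none => []
    | some m => pvALoop ovire xs (acc ++ [(x, m)])

def najdaljsaPot (ovire : List (Int × Int × Int)) : List (Int × Int) :=
  pvALoop ovire (PySem.List.pyRange 1 11 1) []

-- ===== PORT B =====
-- one entry of B's comprehension: 'y if (x1 <= i + 1 <= x2 and (m is None or y < m)) else m'
def pvRow (x1 x2 y : Int) (p : Int × Option Int) : Option Int :=
  match p with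
  | (i, none) => if x1 ≤ i + 1 ∧ i + 1 ≤ x2 then some y else none
  | (i, some m) => if (x1 ≤ i + 1 ∧ i + 1 ≤ x2) ∧ y < m then some y else some m

-- 'mins = [None]*10; for x1, x2, y in ovire: mins = [ ... for i, m in enumerate(mins)]'
def pvBFold (ovire : List (Int × Int × Int)) : List (Option Int) :=
  ovire.foldl (fun mins p => (PySem.List.enumerate mins 0).map (pvRow p.1 p.2.1 p.2.2)) (List.replicate 10 none)

-- the assembly loop; the 'm is None' branch is Python's 'return False', excluded by Pre_
def pvBOut : List (Int × Option Int) → List (Int × Int)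
  | [] => []
  | (_, none) :: _ => []
  | (i, some m) :: rest => (i + 1, m) :: pvBOut rest

def najdaljsaPot_alt (ovire : List (Int × Int × Int)) : List (Int × Int) :=
  pvBOut (PySem.List.enumerate (pvBFold ovire) 0)

-- ===== PRECONDITION & SPEC =====
-- Pre_ excludes exactly the inputs on which some column x in 1..10 is covered by no obstacle:
-- there Python A (and Python B alike) returns the bool False, which is not a value of the
-- declared return type List (Int × Int).
def Pre_najdaljsaPot (ovire : List (Int × Int × Int)) : Prop :=
  ∀ x ∈ PySem.List.pyRange 1 11 1, ∃ p ∈ ovire, p.1 ≤ x ∧ x ≤ p.2.1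
instance (ovire : List (Int × Int × Int)) : Decidable (Pre_najdaljsaPot ovire) := by
  unfold Pre_najdaljsaPot; infer_instance

def pvWitness_najdaljsaPot : (List (Int × Int × Int)) := [(1, 10, 5)]

def Spec_najdaljsaPot (ovire : List (Int × Int × Int)) (out : List (Int × Int)) : Prop := out = najdaljsaPot_alt ovire
instance (ovire : List (Int × Int × Int)) (out : List (Int × Int)) : Decidable (Spec_najdaljsaPot ovire out) := by unfold Spec_najdaljsaPot; infer_instance

-- ===== CLAIM (what is proved, stated in full; the proofs are below) =====
def Claim_equal_najdaljsaPot : Prop := ∀ (ovire : List (Int × Int × Int)), Dom_najdaljsaPot ovire → Pre_najdaljsaPot ovire → Spec_najdaljsaPot ovire (najdaljsaPot ovire)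

-- ===== LEMMAS AND PROOFS =====

-- the per-column minimum accumulator that B's table maintains
def pvStep (o : Option Int) (y : Int) : Option Int :=
  match o with
  | none => some y
  | some m => if y < m then some y else some m

theorem pvSeznamY_eq (ovire : List (Int × Int × Int)) (x : Int) :
    pvSeznamY ovire x
      = (ovire.filter (fun p => decide (p.1 ≤ x ∧ x ≤ p.2.1))).map (fun p => p.2.2) := by
  simpa [pvSeznamY] using
    PySem.List.foldl_append_if (l := ovire) (acc := ([] : List Int))
      (p := fun p => decide (p.1 ≤ x ∧ x ≤ p.2.1)) (f := fun p => p.2.2)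

theorem pvStep_foldl (t : List Int) (a : Int) :
    t.foldl pvStep (some a) = some (t.foldl min a) := by
  induction t generalizing a with
  | nil => rfl
  | cons y t ih =>
      simp only [List.foldl_cons, pvStep]
      split_ifs with hy
      · rw [ih, min_eq_right hy.le]
      · rw [ih, min_eq_left (by omega)]

theorem pvMinFold (ys : List Int) :
    ys.foldl pvStep none = PySem.List.min? ys (fun y => y) := by
  cases ys with
  | nil => rfl
  | cons y t =>
      rw [PySem.List.min?_id_cons]
      simpa [pvStep] using pvStep_foldl t y

theorem pvRow_eq (x1 x2 y : Int) (i : Int) (m : Option Int) :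
    pvRow x1 x2 y (i, m) = if x1 ≤ i + 1 ∧ i + 1 ≤ x2 then pvStep m y else m := by
  cases m with
  | none => simp [pvRow, pvStep]
  | some m =>
      simp only [pvRow, pvStep]
      by_cases hc : x1 ≤ i + 1 ∧ i + 1 ≤ x2 <;> by_cases hy : y < m <;> simp [hc, hy]

theorem pvRowMap_length (x1 x2 y : Int) (mins : List (Option Int)) :
    ((PySem.List.enumerate mins 0).map (pvRow x1 x2 y)).length = mins.length := by
  simp [PySem.List.length_enumerate]

theorem pvRowMap_getD (x1 x2 y : Int) (mins : List (Option Int)) (i : Nat) (h : i < mins.length) :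
    ((PySem.List.enumerate mins 0).map (pvRow x1 x2 y)).getD i none
      = (if x1 ≤ (i : Int) + 1 ∧ (i : Int) + 1 ≤ x2 then pvStep (mins.getD i none) y
         else mins.getD i none) := by
  have he : (PySem.List.enumerate mins 0)[i]? = some ((0 : Int) + i, mins[i]) := by
    rw [PySem.List.getElem?_enumerate]
    simp [List.getElem?_eq_getElem h]
  rw [List.getD_eq_getElem?_getD, List.getElem?_map, he, Option.map_some, Option.getD_some,
    pvRow_eq]
  simp [List.getD_eq_getElem?_getD, List.getElem?_eq_getElem h]

theorem pvBFold_core (ovire : List (Int × Int × Int)) (mins : List (Option Int)) (i : Nat)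
    (h : i < mins.length) :
    (ovire.foldl (fun mins p => (PySem.List.enumerate mins 0).map (pvRow p.1 p.2.1 p.2.2)) mins).getD i none
      = (pvSeznamY ovire ((i : Int) + 1)).foldl pvStep (mins.getD i none) ∧
    (ovire.foldl (fun mins p => (PySem.List.enumerate mins 0).map (pvRow p.1 p.2.1 p.2.2)) mins).length
      = mins.length := by
  induction ovire generalizing mins with
  | nil => simp [pvSeznamY]
  | cons p rest ih =>
      have hlen := pvRowMap_length p.1 p.2.1 p.2.2 mins
      have h' : i < ((PySem.List.enumerate mins 0).map (pvRow p.1 p.2.1 p.2.2)).length := by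
        omega
      obtain ⟨ih1, ih2⟩ := ih ((PySem.List.enumerate mins 0).map (pvRow p.1 p.2.1 p.2.2)) h'
      constructor
      · rw [List.foldl_cons, ih1, pvRowMap_getD p.1 p.2.1 p.2.2 mins i h, pvSeznamY_eq,
          pvSeznamY_eq, List.filter_cons]
        by_cases hc : p.1 ≤ (i : Int) + 1 ∧ (i : Int) + 1 ≤ p.2.1
        · rw [if_pos hc, if_pos (by exact decide_eq_true hc), List.map_cons, List.foldl_cons]
        · rw [if_neg hc, if_neg (by simpa using hc)]
      · rw [List.foldl_cons, ih2, hlen]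

theorem pvBFold_length (ovire : List (Int × Int × Int)) : (pvBFold ovire).length = 10 := by
  have := (pvBFold_core ovire (List.replicate 10 none) 0 (by simp)).2
  simpa [pvBFold] using this

theorem pvBFold_getD (ovire : List (Int × Int × Int)) (i : Nat) (h : i < 10) :
    (pvBFold ovire).getD i none = PySem.List.min? (pvSeznamY ovire ((i : Int) + 1)) (fun y => y) := by
  have hcore := (pvBFold_core ovire (List.replicate 10 none) i (by simpa using h)).1
  rw [pvBFold, hcore]
  have hrep : (List.replicate 10 (none : Option Int)).getD i none = none := by
    rw [List.getD_eq_getElem?_getD, List.getElem?_replicate]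
    simp [h]
  rw [hrep, pvMinFold]

theorem pvALoop_eq (ovire : List (Int × Int × Int)) (xs : List Int) (acc : List (Int × Int))
    (h : ∀ x ∈ xs, PySem.List.min? (pvSeznamY ovire x) (fun y => y) ≠ none) :
    pvALoop ovire xs acc
      = acc ++ xs.map (fun x => (x, (PySem.List.min? (pvSeznamY ovire x) (fun y => y)).getD 0)) := by
  induction xs generalizing acc with
  | nil => simp [pvALoop]
  | cons x xs ih =>
      have hx := h x (by simp)
      obtain ⟨m, hm⟩ := Option.ne_none_iff_exists'.mp hx
      rw [pvALoop, hm]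
      dsimp only
      rw [ih (acc ++ [(x, m)]) (fun z hz => h z (by simp [hz]))]
      simp [hm]

theorem pvBOut_eq (l : List (Option Int)) (s : Int) (h : ∀ o ∈ l, o ≠ none) :
    pvBOut (PySem.List.enumerate l s)
      = (PySem.List.enumerate l s).map (fun p => (p.1 + 1, p.2.getD 0)) := by
  induction l generalizing s with
  | nil => simp [PySem.List.enumerate_nil, pvBOut]
  | cons o t ih =>
      obtain ⟨m, rfl⟩ := Option.ne_none_iff_exists'.mp (h o (by simp))
      rw [PySem.List.enumerate_cons]
      simp only [List.map_cons]
      rw [show pvBOut ((s, some m) :: PySem.List.enumerate t (s + 1))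
            = (s + 1, m) :: pvBOut (PySem.List.enumerate t (s + 1)) from rfl]
      rw [ih (s + 1) (fun o ho => h o (by simp [ho]))]
      simp

theorem pvRange_lit : PySem.List.pyRange 1 11 1 = ([1,2,3,4,5,6,7,8,9,10] : List Int) := by decide

theorem najdaljsaPot_spec_aux (ovire : List (Int × Int × Int)) (hpre : Pre_najdaljsaPot ovire) :
    najdaljsaPot ovire = najdaljsaPot_alt ovire := by
  have hne : ∀ x : Int, 1 ≤ x → x ≤ 10 →
      PySem.List.min? (pvSeznamY ovire x) (fun y => y) ≠ none := by
    intro x h1 h2 hnone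
    have hx : x ∈ PySem.List.pyRange 1 11 1 := by
      rw [pvRange_lit]
      interval_cases x <;> simp
    obtain ⟨p, hp, hc1, hc2⟩ := hpre x hx
    rw [PySem.List.min?_eq_none_iff, pvSeznamY_eq, List.map_eq_nil_iff] at hnone
    have hmem : p ∈ ovire.filter (fun p => decide (p.1 ≤ x ∧ x ≤ p.2.1)) :=
      List.mem_filter.mpr ⟨hp, by simp [hc1, hc2]⟩
    rw [hnone] at hmem
    exact absurd hmem (List.not_mem_nil)
  -- A's side
  have hA : najdaljsaPot ovire
      = ([1,2,3,4,5,6,7,8,9,10] : List Int).map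
          (fun x => (x, (PySem.List.min? (pvSeznamY ovire x) (fun y => y)).getD 0)) := by
    rw [najdaljsaPot, pvRange_lit, pvALoop_eq]
    · simp
    · intro x hx
      apply hne <;> (fin_cases hx <;> omega)
  -- B's side
  have hsome : ∀ o ∈ pvBFold ovire, o ≠ none := by
    intro o ho
    obtain ⟨i, hilt, hget⟩ := List.mem_iff_getElem.mp ho
    have h10 : i < 10 := by rw [pvBFold_length] at hilt; exact hilt
    have := pvBFold_getD ovire i h10
    rw [List.getD_eq_getElem?_getD, List.getElem?_eq_getElem hilt, hget] at this
    simp only [Option.getD_some] at this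
    rw [this]
    exact hne ((i : Int) + 1) (by omega) (by omega)
  have hB : najdaljsaPot_alt ovire
      = (PySem.List.enumerate (pvBFold ovire) 0).map (fun p => (p.1 + 1, p.2.getD 0)) := by
    rw [najdaljsaPot_alt, pvBOut_eq _ _ hsome]
  rw [hA, hB]
  apply List.ext_getElem
  · simp [PySem.List.length_enumerate, pvBFold_length]
  · intro i hi1 hi2
    simp only [List.length_map] at hi1
    have h10 : i < 10 := by simpa using hi1
    have hlen : i < (pvBFold ovire).length := by rw [pvBFold_length]; exact h10
    rw [List.getElem_map, List.getElem_map, PySem.List.getElem_enumerate]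
    have hv : (pvBFold ovire)[i] = PySem.List.min? (pvSeznamY ovire ((i : Int) + 1)) (fun y => y) := by
      have := pvBFold_getD ovire i h10
      rwa [List.getD_eq_getElem?_getD, List.getElem?_eq_getElem hlen, Option.getD_some] at this
    rw [hv]
    have hkey : (([1,2,3,4,5,6,7,8,9,10] : List Int))[i]'hi1 = (i : Int) + 1 := by
      interval_cases i <;> rfl
    rw [hkey]
    simp

-- ===== VERDICT (by name: the statement is the Claim_ definition above) =====
theorem najdaljsaPot_spec : Claim_equal_najdaljsaPot := by
  intro ovire _ hpre
  unfold Spec_najdaljsaPot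
  exact najdaljsaPot_spec_aux ovire hpre
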